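-- pv_equiv track=rewrite | github.com/rustturf/Transmission-Line-Design | calculations.py | select_nc
-- ===== SOURCE A (Python) =====
-- def select_nc(y, mfmargin):
--     less_than_y = [(mfmargin[i], i + 1) for i in range(len(mfmargin)) if mfmargin[i] < y]
--     if len(less_than_y) == 2:
--         min_margin, nc = min(less_than_y)
--         return nc, False
--     elif len(less_than_y) == 1:
--         margin, nc = less_than_y[0]
--         return nc, False
--     else:
--         return None, True
-- ===== SOURCE B (Python) =====
-- def select_nc(y, mfmargin):
--     count = 0
--     best = None  # (margin, index+1) with smallest margin seen, earliest on ties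
--     for i, m in enumerate(mfmargin):
--         if m < y:
--             count += 1
--             if best is None or m < best[0]:
--                 best = (m, i + 1)
--     if count == 1 or count == 2:
--         return best[1], False
--     return None, True
-- ===== Notes on version B (the rewrite author's own statement) =====
-- stated objective: simpler
-- what changed: Replaces the build-intermediate-list + len branch + min() pipeline with a single accumulating pass that keeps only a count and the running (margin, index) minimum, branching on the scalar count.
import Mathlib
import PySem

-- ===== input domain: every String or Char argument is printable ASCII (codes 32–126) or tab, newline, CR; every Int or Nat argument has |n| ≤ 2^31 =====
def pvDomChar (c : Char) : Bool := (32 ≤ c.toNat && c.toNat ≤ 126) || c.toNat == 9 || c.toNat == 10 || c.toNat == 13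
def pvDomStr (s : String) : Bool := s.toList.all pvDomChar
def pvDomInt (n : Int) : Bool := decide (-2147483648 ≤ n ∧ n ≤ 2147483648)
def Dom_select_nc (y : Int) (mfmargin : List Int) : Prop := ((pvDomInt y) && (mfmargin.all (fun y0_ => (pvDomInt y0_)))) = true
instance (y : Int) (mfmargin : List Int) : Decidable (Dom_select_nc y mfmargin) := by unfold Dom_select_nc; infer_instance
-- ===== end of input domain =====

-- B replaces A's build-list + len branch + min() pipeline with one accumulating pass
-- keeping only a count and the running (margin, index) minimum (objective: simpler).

-- ===== PORT A =====
-- Python min on a list of int pairs: lexicographic, first minimal element kept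
-- (exact hand port of min(); none exactly when the list is empty = ValueError).
def pyMinPair (l : List (Int × Int)) : Option (Int × Int) :=
  match l with
  | [] => none
  | x :: t => some (t.foldl (fun b p =>
      if p.1 < b.1 ∨ (p.1 = b.1 ∧ p.2 < b.2) then p else b) x)

def select_nc (y : Int) (mfmargin : List Int) : Option Int × Bool :=
  let less_than_y := (PySem.List.pyRange 0 (mfmargin.length : Int) 1).foldl
      (fun acc i => if PySem.List.pyGetD mfmargin i 0 < y
                    then acc ++ [(PySem.List.pyGetD mfmargin i 0, i + 1)] else acc) []
  if less_than_y.length = 2 then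
    match pyMinPair less_than_y with
    | some (_, nc) => (some nc, false)
    | none => (none, true)   -- unreachable: the list has length 2
  else if less_than_y.length = 1 then
    match less_than_y with
    | (_, nc) :: _ => (some nc, false)
    | [] => (none, true)     -- unreachable: the list has length 1
  else (none, true)

-- ===== PORT B =====
def select_nc_alt (y : Int) (mfmargin : List Int) : Option Int × Bool :=
  let st := (PySem.List.enumerate mfmargin 0).foldl
      (fun (st : Int × Option (Int × Int)) (p : Int × Int) =>
        if p.2 < y then
          (st.1 + 1,
           match st.2 with
           | none => some (p.2, p.1 + 1)
           | some b => if p.2 < b.1 then some (p.2, p.1 + 1) else some b)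
        else st) (0, none)
  if st.1 = 1 ∨ st.1 = 2 then
    match st.2 with
    | some b => (some b.2, false)
    | none => (none, true)   -- unreachable: count ≥ 1 means best is set
  else (none, true)

-- ===== PRECONDITION & SPEC =====
def Spec_select_nc (y : Int) (mfmargin : List Int) (out : Option Int × Bool) : Prop := out = select_nc_alt y mfmargin
instance (y : Int) (mfmargin : List Int) (out : Option Int × Bool) : Decidable (Spec_select_nc y mfmargin out) := by unfold Spec_select_nc; infer_instance

-- ===== CLAIM (what is proved, stated in full; the proofs are below) =====
def Claim_equal_select_nc : Prop := ∀ (y : Int) (mfmargin : List Int), Dom_select_nc y mfmargin → Spec_select_nc y mfmargin (select_nc y mfmargin)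

-- ===== LEMMAS AND PROOFS =====

-- B's fold, characterised: count = length of the filtered/mapped list, best = its running min.
def updFold (b : Option (Int × Int)) (l : List (Int × Int)) : Option (Int × Int) :=
  l.foldl (fun b q =>
    match b with
    | none => some q
    | some b => if q.1 < b.1 then some q else some b) b

lemma updFold_cons (b : Option (Int × Int)) (q : Int × Int) (l : List (Int × Int)) :
    updFold b (q :: l)
      = updFold (match b with
                 | none => some q
                 | some b' => if q.1 < b'.1 then some q else some b') l := rfl

lemma bfold_char (y : Int) (l : List (Int × Int)) :
    ∀ (c : Int) (b : Option (Int × Int)),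
    l.foldl
      (fun (st : Int × Option (Int × Int)) (p : Int × Int) =>
        if p.2 < y then
          (st.1 + 1,
           match st.2 with
           | none => some (p.2, p.1 + 1)
           | some b => if p.2 < b.1 then some (p.2, p.1 + 1) else some b)
        else st) (c, b)
    = (c + ((l.filter (fun p => decide (p.2 < y))).length : Int),
       updFold b ((l.filter (fun p => decide (p.2 < y))).map (fun p => (p.2, p.1 + 1)))) := by
  induction l with
  | nil => intro c b; simp [updFold]
  | cons x t ih =>
    intro c b
    by_cases hx : x.2 < y
    · simp only [List.foldl_cons, List.filter_cons, hx, decide_true, ite_true,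
        List.map_cons, List.length_cons, updFold_cons]
      rw [ih]
      refine Prod.ext ?_ rfl
      push_cast; ring
    · simp only [List.foldl_cons, List.filter_cons, hx, decide_false, ite_false,
        Bool.false_eq_true]
      exact ih c b

theorem select_nc_spec : Claim_equal_select_nc := by
  intro y mfmargin _
  unfold Spec_select_nc select_nc select_nc_alt
  have h1 : (PySem.List.pyRange 0 (mfmargin.length : Int) 1)
      = (PySem.List.enumerate mfmargin 0).map Prod.fst := by
    rw [PySem.List.enumerate_eq_map_pyRange mfmargin 0, List.map_map]
    simp only [PySem.List.len_eq]
    rw [show (Prod.fst ∘ fun j => (j, PySem.List.pyGetD mfmargin j 0)) = id from rfl,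
        List.map_id]
  have hA : ∀ (acc : List (Int × Int)), ∀ p ∈ PySem.List.enumerate mfmargin 0,
      (fun acc (p : Int × Int) => if PySem.List.pyGetD mfmargin p.1 0 < y
          then acc ++ [(PySem.List.pyGetD mfmargin p.1 0, p.1 + 1)] else acc) acc p
      = (fun acc (p : Int × Int) => if p.2 < y then acc ++ [(p.2, p.1 + 1)] else acc) acc p := by
    intro acc p hp
    rcases (PySem.List.mem_enumerate_iff _ _ _).1 hp with ⟨k, hk, rfl⟩
    simp only []
    rw [PySem.List.pyGetD_eq_getElem _ _ (by omega) (by omega)]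
    simp
  have hAlist : (PySem.List.pyRange 0 (mfmargin.length : Int) 1).foldl
      (fun acc i => if PySem.List.pyGetD mfmargin i 0 < y
                    then acc ++ [(PySem.List.pyGetD mfmargin i 0, i + 1)] else acc) []
      = ((PySem.List.enumerate mfmargin 0).filter (fun p => decide (p.2 < y))).map
          (fun p : Int × Int => (p.2, p.1 + 1)) := by
    rw [h1, List.foldl_map, PySem.List.foldl_congr_mem _ _ _ _ hA,
        PySem.List.foldl_append_ite (fun q : Int × Int => q.2 < y)
          (fun q : Int × Int => (q.2, q.1 + 1))]
    simp
  rw [hAlist, bfold_char]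
  rw [show ((PySem.List.enumerate mfmargin 0).filter (fun p => decide (p.2 < y))).length
        = (((PySem.List.enumerate mfmargin 0).filter (fun p => decide (p.2 < y))).map
            (fun p : Int × Int => (p.2, p.1 + 1))).length from (List.length_map _).symm]
  set L := ((PySem.List.enumerate mfmargin 0).filter (fun p => decide (p.2 < y))).map
      (fun p : Int × Int => (p.2, p.1 + 1)) with hL
  have hpw : L.Pairwise (fun p q : Int × Int => p.2 < q.2) := by
    rw [hL, List.pairwise_map]
    exact ((PySem.List.pairwise_lt_enumerate mfmargin 0).filter _).imp (by
      intro a b h; omega)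
  clear_value L
  clear hL hAlist hA h1
  match L, hpw with
  | [], _ => norm_num [updFold]
  | [a], _ => norm_num [pyMinPair, updFold]
  | [a, b], hpw =>
    have hab : a.2 < b.2 := by
      simp only [List.pairwise_cons, List.mem_cons] at hpw
      exact hpw.1 b (Or.inl rfl)
    by_cases h1 : b.1 < a.1
    · norm_num [pyMinPair, updFold, h1]
    · have h2 : ¬ (b.1 = a.1 ∧ b.2 < a.2) := by omega
      norm_num [pyMinPair, updFold, h1, h2]
  | a :: b :: c :: t, _ =>
    have h2 : ¬ ((t.length + 3 : Nat) = 2) := by omega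
    have h1' : ¬ ((t.length + 3 : Nat) = 1) := by omega
    have h3 : ¬ ((0 : Int) + ((t.length + 3 : Nat) : Int) = 1 ∨
        (0 : Int) + ((t.length + 3 : Nat) : Int) = 2) := by push_cast; omega
    simp only [List.length_cons]
    norm_num at h2 h1' h3 ⊢
    simp [h2, updFold]
    omega
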